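-- pv_equiv track=rewrite | github.com/madecompass/AESA | madeaesa/src/emotion_analysis/situation_analyzer.py | _determine_flow_pattern_type
-- ===== SOURCE A (Python) =====
-- from typing import Dict, List, Tuple, Optional, Any, Set, Union, Iterable
--
-- def _determine_flow_pattern_type(intensities: List[str]) -> str:
--     if len(intensities) < 2: return "stable"
--     values = [{"low": 1, "medium": 2, "high": 3}.get(i, 2) for i in intensities]
--     diffs = []
--     for i in range(1, len(values)):
--         diffs.append(values[i] - values[i-1])
--     if all(d > 0 for d in diffs): return "increasing"
--     if all(d < 0 for d in diffs): return "decreasing"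
--     if all(d == 0 for d in diffs): return "stable"
--     if len(set(diffs)) > 2: return "fluctuating"
--     return "mixed"
-- ===== SOURCE B (Python) =====
-- def _determine_flow_pattern_type(intensities):
--     # Single pass over adjacent pairs: flags + distinct-diff set, no diffs list, no repeated scans.
--     if len(intensities) < 2:
--         return "stable"
--     value = {"low": 1, "medium": 2, "high": 3}
--     saw_pos = saw_neg = saw_zero = False
--     dset = set()
--     prev = value.get(intensities[0], 2)
--     for s in intensities[1:]:
--         cur = value.get(s, 2)
--         d = cur - prev
--         if d > 0:
--             saw_pos = True
--         elif d < 0: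
--             saw_neg = True
--         else:
--             saw_zero = True
--         dset.add(d)
--         prev = cur
--     if not saw_neg and not saw_zero:
--         return "increasing"
--     if not saw_pos and not saw_zero:
--         return "decreasing"
--     if not saw_pos and not saw_neg:
--         return "stable"
--     if len(dset) > 2:
--         return "fluctuating"
--     return "mixed"
-- ===== Notes on version B (the rewrite author's own statement) =====
-- stated objective: simpler
-- what changed: Replaced the materialised diffs list and the four separate full scans (three all() passes plus set(diffs)) by one pass over adjacent pairs that maintains saw_pos/saw_neg/saw_zero flags and the set of distinct differences, deciding the pattern from the flags afterwards.
import Mathlib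
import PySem

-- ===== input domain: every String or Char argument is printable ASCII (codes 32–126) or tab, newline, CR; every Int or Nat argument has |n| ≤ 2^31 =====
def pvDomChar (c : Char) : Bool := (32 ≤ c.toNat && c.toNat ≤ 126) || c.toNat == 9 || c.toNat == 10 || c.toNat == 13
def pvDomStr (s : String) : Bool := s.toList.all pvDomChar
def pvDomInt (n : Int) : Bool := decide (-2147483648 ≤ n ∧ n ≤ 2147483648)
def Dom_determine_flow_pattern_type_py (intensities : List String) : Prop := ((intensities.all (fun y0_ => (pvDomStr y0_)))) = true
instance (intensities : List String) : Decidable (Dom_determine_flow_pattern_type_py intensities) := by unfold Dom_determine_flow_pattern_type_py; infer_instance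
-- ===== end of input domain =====

-- B replaces A's materialised diffs list and four full scans by one pass keeping flags and the
-- distinct-difference set (objective: simpler, same O(n) cost).

-- {"low": 1, "medium": 2, "high": 3}.get(i, 2)  (the literal dict both Pythons contain)
def pvVal (s : String) : Int :=
  (PySem.Dict.ofList [("low", (1 : Int)), ("medium", 2), ("high", 3)]).getD s 2

-- ===== PORT A =====
def determine_flow_pattern_type_py (intensities : List String) : String :=
  if intensities.length < 2 then "stable" else
  let values := intensities.map pvVal
  let diffs := (PySem.List.pyRange 1 (values.length : Int) 1).foldl
      (fun acc i => acc ++ [PySem.List.pyGetD values i 0 - PySem.List.pyGetD values (i - 1) 0]) []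
  if diffs.all (fun d => 0 < d) then "increasing"
  else if diffs.all (fun d => d < 0) then "decreasing"
  else if diffs.all (fun d => d == 0) then "stable"
  else if 2 < (PySem.Set.ofList diffs).length then "fluctuating"
  else "mixed"

-- ===== PORT B =====
def determine_flow_pattern_type_py_alt (intensities : List String) : String :=
  if intensities.length < 2 then "stable" else
  let st := (PySem.List.slice intensities (some 1) none).foldl
      (fun (st : Int × Bool × Bool × Bool × PySem.Set Int) s =>
        let cur := pvVal s
        let d := cur - st.1
        (cur,
         (if 0 < d then true else st.2.1),
         (if 0 < d then st.2.2.1 else if d < 0 then true else st.2.2.1),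
         (if 0 < d then st.2.2.2.1 else if d < 0 then st.2.2.2.1 else true),
         PySem.Set.add st.2.2.2.2 d))
      (pvVal (PySem.List.pyGetD intensities 0 ""), false, false, false, PySem.Set.empty)
  if !st.2.2.1 && !st.2.2.2.1 then "increasing"
  else if !st.2.1 && !st.2.2.2.1 then "decreasing"
  else if !st.2.1 && !st.2.2.1 then "stable"
  else if 2 < st.2.2.2.2.length then "fluctuating"
  else "mixed"

-- ===== PRECONDITION & SPEC =====
def Spec_determine_flow_pattern_type_py (intensities : List String) (out : String) : Prop := out = determine_flow_pattern_type_py_alt intensities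
instance (intensities : List String) (out : String) : Decidable (Spec_determine_flow_pattern_type_py intensities out) := by unfold Spec_determine_flow_pattern_type_py; infer_instance

-- ===== CLAIM (what is proved, stated in full; the proofs are below) =====
def Claim_equal_determine_flow_pattern_type_py : Prop := ∀ (intensities : List String), Dom_determine_flow_pattern_type_py intensities → Spec_determine_flow_pattern_type_py intensities (determine_flow_pattern_type_py intensities)

-- ===== LEMMAS AND PROOFS =====

-- Adjacent differences of prev :: (pvVal of each of ss), in order (the common backbone of both ports).
def pvDiffsFrom (prev : Int) : List String → List Int
  | [] => []
  | s :: t => (pvVal s - prev) :: pvDiffsFrom (pvVal s) t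

-- A's index loop produces exactly the adjacent-difference list.
lemma pvA_diffs (prev : Int) (ss : List String) :
    (PySem.List.pyRange 1 ((prev :: ss.map pvVal).length : Int) 1).foldl
      (fun acc i => acc ++ [PySem.List.pyGetD (prev :: ss.map pvVal) i 0
                            - PySem.List.pyGetD (prev :: ss.map pvVal) (i - 1) 0]) []
    = pvDiffsFrom prev ss := by
  rw [PySem.List.foldl_append_singleton_eq_map]
  simp only [List.nil_append]
  induction ss generalizing prev with
  | nil => simp [PySem.List.pyRange_one_eq_nil, pvDiffsFrom]
  | cons s t ih =>
    have hsplit : PySem.List.pyRange 1 ((prev :: (s :: t).map pvVal).length : Int) 1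
        = 1 :: PySem.List.pyRange 2 ((prev :: (s :: t).map pvVal).length : Int) 1 := by
      apply PySem.List.pyRange_one_cons; simp
    rw [hsplit]
    simp only [List.map_cons, pvDiffsFrom]
    congr 1
    · have h0 : (0:Int) ≤ (t.length:Int) + 1 := by positivity
      simp [PySem.List.pyGetD, PySem.List.pyGet?, PySem.List.pyIdx?, h0]
    · -- shift the remaining range down by one onto the tail list
      have := ih (pvVal s)
      rw [← this]
      have hr : PySem.List.pyRange 2 ((prev :: pvVal s :: t.map pvVal).length : Int) 1
          = (PySem.List.pyRange 1 ((pvVal s :: t.map pvVal).length : Int) 1).map (fun i => i + 1) := by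
        rw [PySem.List.pyRange_one, PySem.List.pyRange_one, List.map_map]
        have hNat : (((prev :: pvVal s :: t.map pvVal).length : Int) - 2).toNat
            = (((pvVal s :: t.map pvVal).length : Int) - 1).toNat := by
          simp; omega
        rw [hNat]
        apply List.map_congr_left
        intro k _
        simp [Function.comp]
        ring
      rw [hr, List.map_map]
      apply List.map_congr_left
      intro i hi
      rw [PySem.List.mem_pyRange_one] at hi
      simp only [Function.comp]
      obtain ⟨k, rfl⟩ : ∃ k : ℕ, i = (k : Int) := ⟨i.toNat, by omega⟩
      have hk1 : 1 ≤ k := by exact_mod_cast hi.1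
      have e1 : ((k:Int) + 1) = (((k+1 : ℕ)) : Int) := by push_cast; ring
      have e2 : ((k:Int) + 1 - 1) = ((k : ℕ) : Int) := by ring
      have e3 : ((k:Int) - 1) = (((k-1 : ℕ)) : Int) := by
        have : ((k-1 : ℕ) : Int) = (k:Int) - 1 := by push_cast [hk1]; ring
        omega
      rw [e2, e3, e1, PySem.List.pyGetD_natCast, PySem.List.pyGetD_natCast,
          PySem.List.pyGetD_natCast, PySem.List.pyGetD_natCast]
      obtain ⟨k', rfl⟩ : ∃ k', k = k' + 1 := ⟨k - 1, by omega⟩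
      simp

-- B's single pass computes: (final prev, saw_pos, saw_neg, saw_zero, set of diffs) over pvDiffsFrom.
lemma pvB_loop (ss : List String) (prev : Int) (p n z : Bool) (ds : PySem.Set Int) :
    ss.foldl
      (fun (st : Int × Bool × Bool × Bool × PySem.Set Int) s =>
        let cur := pvVal s
        let d := cur - st.1
        (cur,
         (if 0 < d then true else st.2.1),
         (if 0 < d then st.2.2.1 else if d < 0 then true else st.2.2.1),
         (if 0 < d then st.2.2.2.1 else if d < 0 then st.2.2.2.1 else true),
         PySem.Set.add st.2.2.2.2 d))
      (prev, p, n, z, ds)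
    = ((prev :: ss.map pvVal).getLast (by simp),
       p || (pvDiffsFrom prev ss).any (fun d => 0 < d),
       n || (pvDiffsFrom prev ss).any (fun d => d < 0),
       z || (pvDiffsFrom prev ss).any (fun d => d == 0),
       (pvDiffsFrom prev ss).foldl PySem.Set.add ds) := by
  induction ss generalizing prev p n z ds with
  | nil => simp [pvDiffsFrom]
  | cons s t ih =>
    simp only [List.foldl_cons, pvDiffsFrom, List.any_cons, List.foldl_cons]
    rw [ih]
    simp only [Prod.mk.injEq]
    refine ⟨?_, ?_, ?_, ?_, trivial⟩
    · simp
    · rcases lt_trichotomy (pvVal s - prev) 0 with h | h | h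
      · simp [h, not_lt_of_gt h, Bool.or_assoc, Bool.or_comm, Bool.or_left_comm]
      · simp [h, Bool.or_assoc, Bool.or_comm, Bool.or_left_comm]
      · simp [h, Bool.or_assoc, Bool.or_comm, Bool.or_left_comm]
    · rcases lt_trichotomy (pvVal s - prev) 0 with h | h | h
      · simp [h, Bool.or_assoc, Bool.or_comm, Bool.or_left_comm]
        omega
      · simp [h, Bool.or_assoc, Bool.or_comm, Bool.or_left_comm]
      · simp [h, not_lt_of_gt h, Bool.or_assoc, Bool.or_comm, Bool.or_left_comm]
    · rcases lt_trichotomy (pvVal s - prev) 0 with h | h | h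
      · simp [sub_neg.mp h, not_lt_of_gt (sub_neg.mp h), beq_eq_false_iff_ne.mpr h.ne, Bool.or_assoc,
              Bool.or_comm, Bool.or_left_comm]
      · simp [h, Bool.or_assoc, Bool.or_comm, Bool.or_left_comm]
      · simp [sub_pos.mp h, beq_eq_false_iff_ne.mpr h.ne', Bool.or_assoc, Bool.or_comm, Bool.or_left_comm]

-- The two decision cascades agree for any diffs list.
lemma pvDecide (D : List Int) :
    (if D.all (fun d => 0 < d) then "increasing"
     else if D.all (fun d => d < 0) then "decreasing"
     else if D.all (fun d => d == 0) then "stable"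
     else if 2 < (PySem.Set.ofList D).length then "fluctuating"
     else "mixed")
    = (if !(false || D.any (fun d => d < 0)) && !(false || D.any (fun d => d == 0)) then "increasing"
       else if !(false || D.any (fun d => 0 < d)) && !(false || D.any (fun d => d == 0)) then "decreasing"
       else if !(false || D.any (fun d => 0 < d)) && !(false || D.any (fun d => d < 0)) then "stable"
       else if 2 < (D.foldl PySem.Set.add PySem.Set.empty).length then "fluctuating"
       else "mixed") := by
  have hset : D.foldl PySem.Set.add PySem.Set.empty = PySem.Set.ofList D :=
    (PySem.Set.ofList_eq_foldl D).symm
  rw [hset]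
  have h1 : D.all (fun d => 0 < d) = (!(false || D.any (fun d => d < 0)) && !(false || D.any (fun d => d == 0))) := by
    rw [Bool.eq_iff_iff]
    simp [List.all_eq_true, List.any_eq_true, not_or]
    constructor
    · intro h; constructor <;> intro x hx <;> have := h x hx <;> omega
    · intro ⟨h1, h2⟩ x hx; have := h1 x hx; have := h2 x hx; omega
  have h2 : D.all (fun d => d < 0) = (!(false || D.any (fun d => 0 < d)) && !(false || D.any (fun d => d == 0))) := by
    rw [Bool.eq_iff_iff]
    simp [List.all_eq_true, List.any_eq_true, not_or]
    constructor
    · intro h; constructor <;> intro x hx <;> have := h x hx <;> omega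
    · intro ⟨h1, h2⟩ x hx; have := h1 x hx; have := h2 x hx; omega
  have h3 : D.all (fun d => d == 0) = (!(false || D.any (fun d => 0 < d)) && !(false || D.any (fun d => d < 0))) := by
    rw [Bool.eq_iff_iff]
    simp [List.all_eq_true, List.any_eq_true, not_or]
    constructor
    · intro h; constructor <;> intro x hx <;> have := h x hx <;> omega
    · intro ⟨h1, h2⟩ x hx; have := h1 x hx; have := h2 x hx; omega
  rw [h1, h2, h3]

-- ===== VERDICT (by name: the statement is the Claim_ definition above) =====
theorem determine_flow_pattern_type_py_spec : Claim_equal_determine_flow_pattern_type_py := by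
  intro intensities _
  unfold Spec_determine_flow_pattern_type_py determine_flow_pattern_type_py determine_flow_pattern_type_py_alt
  by_cases hlen : intensities.length < 2
  · simp [hlen]
  · simp only [hlen, if_false]
    obtain ⟨s0, ss, rfl⟩ : ∃ s0 ss, intensities = s0 :: ss := by
      cases intensities with
      | nil => simp at hlen
      | cons a t => exact ⟨a, t, rfl⟩
    have hget0 : PySem.List.pyGetD (s0 :: ss) 0 "" = s0 := by
      simp [PySem.List.pyGetD, PySem.List.pyGet?, PySem.List.pyIdx?]
    have hslice : PySem.List.slice (s0 :: ss) (some 1) none = ss := by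
      simpa using PySem.List.slice_from_one (s0 :: ss)
    rw [hget0, hslice]
    simp only [List.map_cons]
    simp only [pvA_diffs (pvVal s0) ss, pvB_loop]
    exact pvDecide (pvDiffsFrom (pvVal s0) ss)
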